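-- pv_equiv track=rewrite | github.com/mobinaghrz/DSA_LessonPlan | DataStructuresEXP/Queues/Problems/1-balloons.py | solve_balloons
-- ===== SOURCE A (Python) =====
-- class Block:
--     def __init__(self, color, start, end, size):
--         self.color = color
--         self.start = start
--         self.end = end
--         self.size = size
--
-- def solve_balloons(n, balloons):
--     result = [-1] * n
--
--
--     blocks = []
--     start = 0
--     curr_color = balloons[0]
--     for i in range(1, n):
--         if balloons[i] != curr_color:
--             blocks.append(Block(curr_color, start, i - 1, (i - 1) - start + 1))
--             curr_color = balloons[i]
--             start = i
--     blocks.append(Block(curr_color, start, n - 1, (n - 1) - start + 1))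
--
--     day = 1
--     while True:
--         to_pop = [b for b in blocks if b.size >= 3]
--
--         if not to_pop:
--             break
--
--
--         to_pop.sort(key=lambda b: b.start, reverse=True)
--
--         for block in to_pop:
--             for idx in range(block.start, block.end + 1):
--                 if result[idx] == -1:
--                     result[idx] = day
--
--         blocks = [b for b in blocks if b.size < 3]
--
--         merged_blocks = []
--         for block in blocks:
--             if merged_blocks and merged_blocks[-1].color == block.color:
--                 merged_blocks[-1].end = block.end
--                 merged_blocks[-1].size += block.size
--             else:
--                 merged_blocks.append(block)
--         blocks = merged_blocks
--
--         day += 1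
--
--     return result
-- ===== SOURCE B (Python) =====
-- def _flush(group, result, keep, day):
--     # close the current same-color group: pop it (>=3) or keep its positions
--     if len(group) >= 3:
--         for q in group:
--             result[q] = day
--         return True
--     keep.extend(group)
--     return False
--
-- def solve_balloons(n, balloons):
--     result = [-1] * n
--     surv = list(range(n))           # positions still on the board, ascending
--     day = 1
--     changed = True
--     while changed:
--         changed = False
--         keep = []
--         group = []                  # current maximal same-color group of positions
--         for p in surv:
--             if group and balloons[p] != balloons[group[0]]:
--                 changed |= _flush(group, result, keep, day)
--                 group = [p]
--             else:
--                 group.append(p)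
--         changed |= _flush(group, result, keep, day)
--         surv = keep
--         day += 1
--     return result
-- ===== Notes on version B (the rewrite author's own statement) =====
-- stated objective: simpler
-- what changed: B drops A's Block objects entirely: instead of maintaining run-length-encoded blocks with a per-day filter + sort + guarded range-rescan of result + second filter + explicit merge pass, B keeps only the flat ascending list of surviving positions and, each day, regroups it by color in one scan, writing pop days directly (unguarded) to exactly the surviving positions; merging is implicit in the regrouping, so the per-day wave structure (which is observable in the output labels) is the only thing shared with A.
import Mathlib
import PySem

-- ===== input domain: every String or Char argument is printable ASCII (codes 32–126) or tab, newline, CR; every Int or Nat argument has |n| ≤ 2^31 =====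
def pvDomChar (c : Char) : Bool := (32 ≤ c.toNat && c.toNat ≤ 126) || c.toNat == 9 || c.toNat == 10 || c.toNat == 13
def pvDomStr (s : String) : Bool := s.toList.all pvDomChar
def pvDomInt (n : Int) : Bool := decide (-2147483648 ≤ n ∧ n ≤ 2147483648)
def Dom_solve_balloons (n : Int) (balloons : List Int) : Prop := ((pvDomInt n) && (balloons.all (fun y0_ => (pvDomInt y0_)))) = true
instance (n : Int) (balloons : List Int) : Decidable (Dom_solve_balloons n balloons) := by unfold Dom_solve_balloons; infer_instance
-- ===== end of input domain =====

-- B keeps only the flat list of surviving positions and regroups it by color in one scan per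
-- day, writing pop days directly; it has no block objects, sizes, merge pass, sort or guarded
-- writes (objective: a simpler, structurally different formulation; not claimed faster).

-- ===== PORT A =====
structure Block where
  color : Int
  start : Int
  stop : Int
  size : Int
deriving DecidableEq, Repr

-- merged_blocks loop body of A (append, or absorb into the last element)
def mergeStepA (acc : List Block) (b : Block) : List Block :=
  match acc with
  | m :: rest => if m.color = b.color then ⟨m.color, m.start, b.stop, m.size + b.size⟩ :: rest else b :: m :: rest
  | [] => [b]

-- (termination helper for loopA, cited in decreasing_by)
theorem mergeA_len : ∀ (l acc : List Block), (List.foldl mergeStepA acc l).length ≤ acc.length + l.length := by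
  intro l
  induction l with
  | nil => simp
  | cons b t ih =>
    intro acc
    have h := ih (mergeStepA acc b)
    have : (mergeStepA acc b).length ≤ acc.length + 1 := by
      unfold mergeStepA
      match acc with
      | [] => simp
      | m :: rest => dsimp; split <;> simp
    simp only [List.foldl_cons, List.length_cons]
    omega

-- the inner 'if result[idx] == -1: result[idx] = day' loop of A
def gfill (day : Int) (res : List Int) (b : Block) : List Int :=
  (PySem.List.pyRange b.start (b.stop + 1) 1).foldl
    (fun r idx => if PySem.List.pyGetD r idx 0 = -1 then PySem.List.pySetD r idx day else r) res

def loopA (result : List Int) (blocks : List Block) (day : Int) : List Int :=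
  let to_pop := blocks.filter (fun b => decide (3 ≤ b.size))
  if to_pop = [] then result
  else
    let sorted := PySem.List.sorted to_pop (fun b => b.start) true
    let result' := sorted.foldl (gfill day) result
    let keep := blocks.filter (fun b => decide (b.size < 3))
    let merged := (keep.foldl mergeStepA []).reverse
    loopA result' merged (day + 1)
termination_by blocks.length
decreasing_by
  rename_i h
  simp only [to_pop] at h
  rw [List.unattach_filter (g := fun b : Block => decide (3 ≤ b.size)) (hf := fun x h => rfl),
    List.unattach_attach] at h
  have h1 : (blocks.filter (fun b => decide (b.size < 3))).length < blocks.length := by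
    refine List.length_filter_lt_length_iff_exists.mpr ?_
    rcases List.exists_mem_of_ne_nil _ h with ⟨b, hb⟩
    have h3 := List.of_mem_filter hb
    refine ⟨b, List.mem_of_mem_filter hb, ?_⟩
    simp at h3 ⊢
    omega
  have h2 := mergeA_len (blocks.filter (fun b => decide (b.size < 3))) []
  simp only [List.length_nil, Nat.zero_add] at h2
  rw [List.length_reverse,
    List.unattach_filter (g := fun b : Block => decide (b.size < 3)) (hf := fun x h => rfl),
    List.unattach_attach]
  omega

def solve_balloons (n : Int) (balloons : List Int) : List Int :=
  let result := List.replicate n.toNat (-1 : Int)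
  let st := (PySem.List.pyRange 1 n 1).foldl
    (fun (st : Int × Int × List Block) i =>
      if PySem.List.pyGetD balloons i 0 ≠ st.2.1 then
        (i, PySem.List.pyGetD balloons i 0, st.2.2 ++ [⟨st.2.1, st.1, i - 1, (i - 1) - st.1 + 1⟩])
      else st)
    (0, PySem.List.pyGetD balloons 0 0, ([] : List Block))
  let blocks := st.2.2 ++ [⟨st.2.1, st.1, n - 1, (n - 1) - st.1 + 1⟩]
  loopA result blocks 1

-- ===== PORT B =====
-- _flush: pop the closed group (>= 3) writing its day, or keep its positions
def flushB (group result keep : List Int) (day : Int) : List Int × List Int × Bool :=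
  if 3 ≤ group.length then
    (group.foldl (fun r q => PySem.List.pySetD r q day) result, keep, true)
  else (result, keep ++ group, false)

-- body of B's per-day 'for p in surv' scan; state = (changed, keep, group, result)
def stepP (balloons : List Int) (day : Int)
    (st : Bool × List Int × List Int × List Int) (p : Int) :
    Bool × List Int × List Int × List Int :=
  if st.2.2.1 ≠ [] ∧
      PySem.List.pyGetD balloons p 0 ≠ PySem.List.pyGetD balloons (st.2.2.1.headD 0) 0 then
    let fl := flushB st.2.2.1 st.2.2.2 st.2.1 day
    (st.1 || fl.2.2, fl.2.1, [p], fl.1)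
  else (st.1, st.2.1, st.2.2.1 ++ [p], st.2.2.2)

-- (termination helper for loopB, cited in decreasing_by)
theorem stepP_size (bal : List Int) (day : Int) :
    ∀ (l : List Int) (ch : Bool) (keep group result : List Int),
    ((l.foldl (stepP bal day) (ch, keep, group, result)).2.1.length
        + (l.foldl (stepP bal day) (ch, keep, group, result)).2.2.1.length
      ≤ keep.length + group.length + l.length)
    ∧ ((l.foldl (stepP bal day) (ch, keep, group, result)).1 = true → ch = true ∨
        (l.foldl (stepP bal day) (ch, keep, group, result)).2.1.length
          + (l.foldl (stepP bal day) (ch, keep, group, result)).2.2.1.length + 3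
        ≤ keep.length + group.length + l.length) := by
  intro l
  induction l with
  | nil =>
    intro ch keep group result
    constructor
    · simp
    · intro h
      exact Or.inl h
  | cons p t ih =>
    intro ch keep group result
    simp only [List.foldl_cons, List.length_cons]
    by_cases hc : group ≠ [] ∧
        PySem.List.pyGetD bal p 0 ≠ PySem.List.pyGetD bal (group.headD 0) 0
    · have hstep : stepP bal day (ch, keep, group, result) p =
          if 3 ≤ group.length then (ch || true, keep, [p],
            group.foldl (fun r q => PySem.List.pySetD r q day) result)
          else (ch || false, keep ++ group, [p], result) := by
        unfold stepP flushB
        rw [if_pos hc]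
        split <;> rfl
      by_cases hg : 3 ≤ group.length
      · rw [hstep, if_pos hg]
        have h1 := (ih (ch || true) keep [p] (group.foldl (fun r q => PySem.List.pySetD r q day) result)).1
        simp only [List.length_singleton] at h1
        constructor
        · omega
        · intro _; right; omega
      · rw [hstep, if_neg hg, Bool.or_false]
        have h1 := (ih ch (keep ++ group) [p] result).1
        have h2 := (ih ch (keep ++ group) [p] result).2
        simp only [List.length_singleton, List.length_append] at h1 h2
        constructor
        · omega
        · intro hh
          rcases h2 hh with h | h
          · exact Or.inl h
          · right; omega
    · have hstep : stepP bal day (ch, keep, group, result) p =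
          (ch, keep, group ++ [p], result) := by
        unfold stepP
        rw [if_neg hc]
      rw [hstep]
      have h1 := (ih ch keep (group ++ [p]) result).1
      have h2 := (ih ch keep (group ++ [p]) result).2
      simp only [List.length_append, List.length_singleton] at h1 h2
      constructor
      · omega
      · intro hh
        rcases h2 hh with h | h
        · exact Or.inl h
        · right; omega

-- B's day loop: scan surv, final flush, recurse while something popped
def loopB (result surv balloons : List Int) (day : Int) : List Int :=
  let st := surv.foldl (stepP balloons day) (false, [], [], result)
  let fl := flushB st.2.2.1 st.2.2.2 st.2.1 day
  if st.1 || fl.2.2 then loopB fl.1 fl.2.1 balloons (day + 1) else fl.1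
termination_by surv.length
decreasing_by
  rename_i h
  have H := stepP_size balloons day surv false [] [] result
  simp only [List.length_nil, Nat.zero_add] at H
  obtain ⟨H1, H2⟩ := H
  simp only [st, fl] at h ⊢
  rw [List.foldl_attach] at h ⊢
  set t := surv.foldl (stepP balloons day) (false, [], [], result) with ht
  by_cases hg : 3 ≤ t.2.2.1.length
  · rw [flushB, if_pos hg]
    dsimp only
    omega
  · rw [flushB, if_neg hg] at h ⊢
    simp only [Bool.or_false] at h
    rcases H2 h with h' | h'
    · exact absurd h' (by simp)
    · dsimp only
      simp only [List.length_append]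
      omega

def solve_balloons_alt (n : Int) (balloons : List Int) : List Int :=
  loopB (List.replicate n.toNat (-1)) (PySem.List.pyRange 0 n 1) balloons 1

-- ===== PRECONDITION & SPEC =====
-- Pre_ excludes exactly the inputs where the Python A raises IndexError: it always reads
-- balloons[0] (so balloons must be nonempty) and reads balloons[i] for i < n (so n ≤ len).
def Pre_solve_balloons (n : Int) (balloons : List Int) : Prop :=
  balloons ≠ [] ∧ n ≤ (balloons.length : Int)
instance (n : Int) (balloons : List Int) : Decidable (Pre_solve_balloons n balloons) := by
  unfold Pre_solve_balloons; infer_instance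

def pvWitness_solve_balloons : Int × List Int := (5, [1, 1, 1, 2, 2])

def Spec_solve_balloons (n : Int) (balloons : List Int) (out : List Int) : Prop :=
  out = solve_balloons_alt n balloons
instance (n : Int) (balloons : List Int) (out : List Int) : Decidable (Spec_solve_balloons n balloons out) := by
  unfold Spec_solve_balloons; infer_instance

-- ===== CLAIM (what is proved, stated in full; the proofs are below) =====
def Claim_equal_solve_balloons : Prop := ∀ (n : Int) (balloons : List Int),
  Dom_solve_balloons n balloons → Pre_solve_balloons n balloons →
  Spec_solve_balloons n balloons (solve_balloons n balloons)

-- ===== LEMMAS AND PROOFS =====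

-- proof-side abbreviations: a "group" is the list of surviving positions of one block
def colorOf (bal : List Int) (p : Int) : Int := PySem.List.pyGetD bal p 0

def toBlock (bal : List Int) (g : List Int) : Block :=
  ⟨colorOf bal (g.headD 0), g.headD 0, g.getLastD 0, (g.length : Int)⟩

def markG (day : Int) (r : List Int) (g : List Int) : List Int :=
  g.foldl (fun r q => PySem.List.pySetD r q day) r

def dayRes (day : Int) (res : List Int) (L : List (List Int)) : List Int :=
  L.foldl (fun r g => if 3 ≤ g.length then markG day r g else r) res

def dayKeep (L : List (List Int)) : List Int :=
  (L.filter (fun g => decide (g.length < 3))).flatten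

def dayChanged (L : List (List Int)) : Bool := L.any (fun g => decide (3 ≤ g.length))

def mergeG (bal : List Int) (acc : List (List Int)) (g : List Int) : List (List Int) :=
  match acc with
  | h :: t =>
    if colorOf bal (h.headD 0) = colorOf bal (g.headD 0) then (h ++ g) :: t else g :: h :: t
  | [] => [g]

def regroup (bal : List Int) (L : List (List Int)) : List (List Int) :=
  (L.foldl (mergeG bal) []).reverse

def GoodG (bal : List Int) (g : List Int) : Prop :=
  g ≠ [] ∧ ∀ p ∈ g, colorOf bal p = colorOf bal (g.headD 0)

def Differ (bal : List Int) (g h : List Int) : Prop :=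
  colorOf bal (g.headD 0) ≠ colorOf bal (h.headD 0)

theorem headD_append {g : List Int} (t : List Int) (d : Int) (h : g ≠ []) :
    (g ++ t).headD d = g.headD d := by
  cases g with
  | nil => exact absurd rfl h
  | cons a l => rfl

theorem getLastD_append (g : List Int) {t : List Int} (d : Int) (h : t ≠ []) :
    (g ++ t).getLastD d = t.getLastD d := by
  rw [List.getLastD_eq_getLast?, List.getLastD_eq_getLast?,
    List.getLast?_append_of_ne_nil (l₁ := g) h]

theorem getLastD_irrel {α : Type} {l : List α} (d e : α) (h : l ≠ []) :
    l.getLastD d = l.getLastD e := by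
  rw [List.getLastD_eq_getLast?, List.getLastD_eq_getLast?]
  cases hl : l.getLast? with
  | none => exact absurd (List.getLast?_eq_none_iff.mp hl) h
  | some a => rfl

theorem dropLast_getLastD {α : Type} (l : List α) (d : α) (h : l ≠ []) :
    l.dropLast ++ [l.getLastD d] = l := by
  rw [List.getLastD_eq_getLast?, List.getLast?_eq_some_getLast h]
  simpa using List.dropLast_append_getLast h

theorem headD_mem {l : List Int} (d : Int) (h : l ≠ []) : l.headD d ∈ l := by
  cases l with
  | nil => exact absurd rfl h
  | cons a t => exact List.mem_cons_self

-- the A build loop and its characterisation (reused machinery)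
def buildStepA (balloons : List Int) (st : Int × Int × List Block) (i : Int) : Int × Int × List Block :=
  if PySem.List.pyGetD balloons i 0 ≠ st.2.1 then
    (i, PySem.List.pyGetD balloons i 0, st.2.2 ++ [⟨st.2.1, st.1, i - 1, (i - 1) - st.1 + 1⟩])
  else st

def finishBuild (n : Int) (st : Int × Int × List Block) : List Block :=
  st.2.2 ++ [⟨st.2.1, st.1, n - 1, (n - 1) - st.1 + 1⟩]

theorem foldl_fixed {α β : Type} (f : β → α → β) (s : β) (l : List α)
    (h : ∀ x ∈ l, f s x = s) : List.foldl f s l = s := by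
  induction l with
  | nil => rfl
  | cons a t ih =>
    simp only [List.foldl_cons, h a (by simp)]
    exact ih (fun x hx => h x (by simp [hx]))

theorem foldl_len {α : Type} (f : List Int → α → List Int)
    (h : ∀ r x, (f r x).length = r.length) :
    ∀ (xs : List α) (res : List Int), (List.foldl f res xs).length = res.length := by
  intro xs
  induction xs with
  | nil => intro res; rfl
  | cons a t ih => intro res; rw [List.foldl_cons, ih, h]

-- the inner 'while j < n and ...' scan used to describe A's initial runs
def scanJ (n : Int) (balloons : List Int) (c : Int) (j : Int) : Int :=
  if j < n ∧ PySem.List.pyGetD balloons j 0 = c then scanJ n balloons c (j + 1) else j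
termination_by (n - j).toNat
decreasing_by omega

theorem le_scanJ (n : Int) (balloons : List Int) (c : Int) : ∀ j, j ≤ scanJ n balloons c j := by
  intro j
  rw [scanJ]
  split
  · have := le_scanJ n balloons c (j + 1)
    omega
  · omega
termination_by j => (n - j).toNat
decreasing_by omega

theorem scanJ_le (n : Int) (bal : List Int) (c : Int) : ∀ j, j ≤ n → scanJ n bal c j ≤ n := by
  intro j hj
  rw [scanJ]
  split
  · next h => exact scanJ_le n bal c (j + 1) (by omega)
  · exact hj
termination_by j => (n - j).toNat
decreasing_by rename_i h; omega

theorem scanJ_mid (n : Int) (bal : List Int) (c : Int) :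
    ∀ j k, j ≤ k → k < scanJ n bal c j → PySem.List.pyGetD bal k 0 = c := by
  intro j k hjk hk
  rw [scanJ] at hk
  by_cases h : j < n ∧ PySem.List.pyGetD bal j 0 = c
  · rw [if_pos h] at hk
    by_cases hkj : k = j
    · subst hkj; exact h.2
    · exact scanJ_mid n bal c (j + 1) k (by omega) hk
  · rw [if_neg h] at hk
    omega
termination_by j => (n - j).toNat
decreasing_by omega

theorem scanJ_stop (n : Int) (bal : List Int) (c : Int) :
    ∀ j, scanJ n bal c j < n → PySem.List.pyGetD bal (scanJ n bal c j) 0 ≠ c := by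
  intro j
  rw [scanJ]
  by_cases h : j < n ∧ PySem.List.pyGetD bal j 0 = c
  · rw [if_pos h]
    exact scanJ_stop n bal c (j + 1)
  · rw [if_neg h]
    intro hlt heq
    exact h ⟨hlt, heq⟩
termination_by j => (n - j).toNat
decreasing_by omega

-- initial groups: positions of the maximal same-color runs
def grpRuns (n : Int) (bal : List Int) (i : Int) : List (List Int) :=
  if i < n then
    PySem.List.pyRange i (scanJ n bal (colorOf bal i) (i + 1)) 1 :: grpRuns n bal (scanJ n bal (colorOf bal i) (i + 1))
  else []
termination_by (n - i).toNat
decreasing_by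
  have := le_scanJ n bal (colorOf bal i) (i + 1)
  omega

theorem toBlock_pyRange (bal : List Int) (i j : Int) (h : i < j) :
    toBlock bal (PySem.List.pyRange i j 1) = ⟨colorOf bal i, i, j - 1, j - i⟩ := by
  have h2 : (PySem.List.pyRange i j 1).headD 0 = i := by
    rw [PySem.List.pyRange_one_cons h]; rfl
  have h3 : (PySem.List.pyRange i j 1).getLastD 0 = j - 1 := by
    have e : j - 1 + 1 = j := by omega
    have hsplit : PySem.List.pyRange i j 1 = PySem.List.pyRange i (j - 1) 1 ++ [j - 1] := by
      rw [← PySem.List.pyRange_one_succ_right (by omega : i ≤ j - 1), e]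
    rw [hsplit, List.getLastD_concat]
  have h4 : ((PySem.List.pyRange i j 1).length : Int) = j - i := by
    rw [PySem.List.length_pyRange_one]; omega
  unfold toBlock
  rw [h2, h3, h4]

theorem grp_flatten (n : Int) (bal : List Int) :
    ∀ i : Int, 0 ≤ i → (grpRuns n bal i).flatten = PySem.List.pyRange i n 1 := by
  intro i hi
  rw [grpRuns]
  by_cases h : i < n
  · rw [if_pos h]
    set j := scanJ n bal (colorOf bal i) (i + 1) with hj
    have hij : i + 1 ≤ j := le_scanJ n bal (colorOf bal i) (i + 1)
    have hjn : j ≤ n := scanJ_le n bal (colorOf bal i) (i + 1) (by omega)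
    rw [List.flatten_cons, grp_flatten n bal j (by omega)]
    rw [← PySem.List.pyRange_one_append i j n (by omega) hjn]
  · rw [if_neg h]
    rw [PySem.List.pyRange_one_eq_nil (by omega)]
    rfl
termination_by i => (n - i).toNat
decreasing_by
  have := le_scanJ n bal (colorOf bal i) (i + 1)
  omega

theorem grp_good (n : Int) (bal : List Int) :
    ∀ i : Int, 0 ≤ i → ∀ g ∈ grpRuns n bal i, GoodG bal g := by
  intro i hi g hg
  rw [grpRuns] at hg
  by_cases h : i < n
  · rw [if_pos h] at hg
    set j := scanJ n bal (colorOf bal i) (i + 1) with hj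
    have hij : i + 1 ≤ j := le_scanJ n bal (colorOf bal i) (i + 1)
    rcases List.mem_cons.mp hg with h' | h'
    · subst h'
      constructor
      · rw [PySem.List.pyRange_one_cons (by omega)]
        exact List.cons_ne_nil _ _

      · intro p hp
        have hpm := PySem.List.mem_pyRange_one.mp hp
        have hhead : (PySem.List.pyRange i j 1).headD 0 = i := by
          rw [PySem.List.pyRange_one_cons (by omega)]; rfl
        rw [hhead]
        by_cases hpi : p = i
        · rw [hpi]
        · exact scanJ_mid n bal (colorOf bal i) (i + 1) p (by omega) hpm.2
    · exact grp_good n bal j (by omega) g h'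
  · rw [if_neg h] at hg
    exact absurd hg (List.not_mem_nil)
termination_by i => (n - i).toNat
decreasing_by
  have := le_scanJ n bal (colorOf bal i) (i + 1)
  omega

theorem grp_chain (n : Int) (bal : List Int) :
    ∀ i : Int, 0 ≤ i → List.IsChain (Differ bal) (grpRuns n bal i) := by
  intro i hi
  rw [grpRuns]
  by_cases h : i < n
  · rw [if_pos h]
    set j := scanJ n bal (colorOf bal i) (i + 1) with hj
    have hij : i + 1 ≤ j := le_scanJ n bal (colorOf bal i) (i + 1)
    rw [List.isChain_cons]
    constructor
    · intro b hb
      rw [grpRuns] at hb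
      by_cases h2 : j < n
      · rw [if_pos h2] at hb
        simp only [List.head?_cons, Option.mem_def, Option.some.injEq] at hb
        subst hb
        unfold Differ
        have e1 : (PySem.List.pyRange i j 1).headD 0 = i := by
          rw [PySem.List.pyRange_one_cons (by omega)]; rfl
        have hjj : j < scanJ n bal (colorOf bal j) (j + 1) := by
          have := le_scanJ n bal (colorOf bal j) (j + 1); omega
        have e2 : (PySem.List.pyRange j (scanJ n bal (colorOf bal j) (j + 1)) 1).headD 0 = j := by
          rw [PySem.List.pyRange_one_cons (by omega)]; rfl
        rw [e1, e2]
        exact fun hcon => scanJ_stop n bal (colorOf bal i) (i + 1) h2 hcon.symm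
      · rw [if_neg h2] at hb
        simp at hb
    · exact grp_chain n bal j (by omega)
  · rw [if_neg h]
    exact List.isChain_nil
termination_by i => (n - i).toNat
decreasing_by
  have := le_scanJ n bal (colorOf bal i) (i + 1)
  omega

theorem build_eq (n : Int) (balloons : List Int) :
    ∀ (i : Int) (acc : List Block), 0 ≤ i → i < n →
    finishBuild n ((PySem.List.pyRange (i + 1) n 1).foldl (buildStepA balloons)
        (i, PySem.List.pyGetD balloons i 0, acc))
      = acc ++ (grpRuns n balloons i).map (toBlock balloons) := by
  intro i acc hi hin
  set c := PySem.List.pyGetD balloons i 0 with hc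
  have hcol : colorOf balloons i = c := by rw [hc]; rfl
  set j := scanJ n balloons c (i + 1) with hj
  have hj1 : i + 1 ≤ j := le_scanJ n balloons c (i + 1)
  have hjn : j ≤ n := scanJ_le n balloons c (i + 1) (by omega)
  rw [PySem.List.pyRange_one_append (i + 1) j n (by omega) hjn, List.foldl_append]
  have hfix : List.foldl (buildStepA balloons) (i, c, acc) (PySem.List.pyRange (i + 1) j 1)
      = (i, c, acc) := by
    apply foldl_fixed
    intro x hx
    rcases PySem.List.mem_pyRange_one.mp hx with ⟨hx1, hx2⟩
    have : PySem.List.pyGetD balloons x 0 = c := scanJ_mid n balloons c (i + 1) x hx1 hx2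
    simp [buildStepA, this]
  rw [hfix]
  rw [grpRuns, hcol, ← hj]
  rw [if_pos hin]
  by_cases hjlt : j < n
  · rw [PySem.List.pyRange_one_cons hjlt, List.foldl_cons]
    have hne : PySem.List.pyGetD balloons j 0 ≠ c := scanJ_stop n balloons c (i + 1) hjlt
    have hstep : buildStepA balloons (i, c, acc) j
        = (j, PySem.List.pyGetD balloons j 0, acc ++ [⟨c, i, j - 1, (j - 1) - i + 1⟩]) := by
      simp [buildStepA, hne]
    rw [hstep]
    have hrec := build_eq n balloons j (acc ++ [⟨c, i, j - 1, (j - 1) - i + 1⟩]) (by omega) hjlt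
    rw [hrec]
    rw [List.map_cons, toBlock_pyRange balloons i j (by omega), hcol]
    have hsz : (j - 1) - i + 1 = j - i := by omega
    rw [hsz]
    simp [List.append_assoc]
  · have hjeq : j = n := by omega
    rw [PySem.List.pyRange_one_eq_nil (by omega), List.foldl_nil]
    unfold finishBuild
    have hnil : grpRuns n balloons j = [] := by
      rw [grpRuns, if_neg (by omega : ¬ j < n)]
    rw [hnil]
    rw [List.map_cons, List.map_nil, toBlock_pyRange balloons i j (by omega), hcol]
    dsimp only
    rw [hjeq]
    have hsz : (n - 1) - i + 1 = n - i := by omega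
    rw [hsz]
termination_by i => (n - i).toNat
decreasing_by
  rw [hc] at hj
  omega

-- ---- pointwise descriptions of the marking operations ----

theorem gfillRange_get (e d : Int) (s : Int) (res : List Int) (k : Nat) (hs : 0 ≤ s) :
    ((PySem.List.pyRange s (e + 1) 1).foldl
        (fun r idx => if PySem.List.pyGetD r idx 0 = -1 then PySem.List.pySetD r idx d else r) res)[k]?
      = if s ≤ (k : Int) ∧ (k : Int) ≤ e ∧ res[k]? = some (-1) then some d else res[k]? := by
  by_cases h : s < e + 1
  · rw [PySem.List.pyRange_one_cons h, List.foldl_cons]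
    have hstep : (if PySem.List.pyGetD res s 0 = -1 then PySem.List.pySetD res s d else res)
        = if res[s.toNat]? = some (-1) then res.set s.toNat d else res := by
      by_cases hin : s.toNat < res.length
      · rw [PySem.List.pyGetD_eq_getElem res 0 hs (by omega), PySem.List.pySetD_of_nonneg res d hs]
        rw [List.getElem?_eq_getElem hin]
        by_cases hv : res[s.toNat] = -1 <;> simp [hv]
      · rw [List.getElem?_eq_none (by omega)]
        have hg : PySem.List.pyGetD res s 0 = 0 := by
          apply PySem.List.pyGetD_of_none
          rw [PySem.List.pyGet?_eq_none_iff]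
          unfold PySem.Raise.InRange
          omega
        simp [hg]
    rw [hstep]
    set res' := if res[s.toNat]? = some (-1) then res.set s.toNat d else res with hres'
    rw [gfillRange_get e d (s + 1) res' k (by omega)]
    have hne : ∀ (j : Nat), j ≠ s.toNat → res'[j]? = res[j]? := by
      intro j hj
      rw [hres']
      split
      · rw [List.getElem?_set, if_neg (by omega)]
      · rfl
    by_cases hk : s.toNat = k
    · subst hk
      by_cases hv : res[s.toNat]? = some (-1)
      · have hres'' : res' = res.set s.toNat d := by rw [hres', if_pos hv]
        have hlen : s.toNat < res.length := by
          by_contra hcon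
          rw [List.getElem?_eq_none (by omega)] at hv
          exact absurd hv (by simp)
        have hL : res'[s.toNat]? = some d := by
          rw [hres'', List.getElem?_set]
          simp [hlen]
        rw [if_neg (fun hcon => absurd hcon.1 (by omega)), hL]
        rw [if_pos ⟨by omega, by omega, hv⟩]
      · have hres'' : res' = res := by rw [hres', if_neg hv]
        rw [hres'']
        rw [if_neg (fun hcon => absurd hcon.1 (by omega)),
            if_neg (fun hcon => hv hcon.2.2)]
    · have hval : res'[k]? = res[k]? := hne k (fun hcon => hk hcon.symm)
      rw [hval]
      have hiff : (s + 1 ≤ (k : Int) ∧ (k : Int) ≤ e ∧ res[k]? = some (-1))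
          ↔ (s ≤ (k : Int) ∧ (k : Int) ≤ e ∧ res[k]? = some (-1)) := by
        constructor
        · rintro ⟨h1, h2, h3⟩; exact ⟨by omega, h2, h3⟩
        · rintro ⟨h1, h2, h3⟩
          have : (k : Int) ≠ s := by omega
          exact ⟨by omega, h2, h3⟩
      simp only [hiff]
  · rw [PySem.List.pyRange_one_eq_nil (by omega), List.foldl_nil]
    have : ¬ (s ≤ (k : Int) ∧ (k : Int) ≤ e ∧ res[k]? = some (-1)) := by
      rintro ⟨h1, h2, _⟩; omega
    simp [this]
termination_by (e + 1 - s).toNat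
decreasing_by omega

theorem gfill_get (day : Int) (b : Block) (res : List Int) (k : Nat) (hs : 0 ≤ b.start) :
    (gfill day res b)[k]?
      = if b.start ≤ (k : Int) ∧ (k : Int) ≤ b.stop ∧ res[k]? = some (-1) then some day
        else res[k]? := gfillRange_get b.stop day b.start res k hs

theorem gfill_fold_get (day : Int) (hd : day ≠ -1) :
    ∀ (L : List Block) (res : List Int) (k : Nat), (∀ b ∈ L, 0 ≤ b.start) →
    (L.foldl (gfill day) res)[k]?
      = if (∃ b ∈ L, b.start ≤ (k : Int) ∧ (k : Int) ≤ b.stop) ∧ res[k]? = some (-1) then some day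
        else res[k]? := by
  intro L
  induction L with
  | nil => intro res k _; simp
  | cons b t ih =>
    intro res k hL
    rw [List.foldl_cons, ih _ k (fun x hx => hL x (by simp [hx]))]
    rw [gfill_get day b res k (hL b (by simp))]
    have hday : ¬ ((some day : Option Int) = some (-1)) := by simpa using hd
    by_cases hv : res[k]? = some (-1)
    · by_cases hcov : b.start ≤ (k : Int) ∧ (k : Int) ≤ b.stop
      · have e1 : (if b.start ≤ (k : Int) ∧ (k : Int) ≤ b.stop ∧ res[k]? = some (-1)
            then some day else res[k]?) = some day := if_pos ⟨hcov.1, hcov.2, hv⟩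
        rw [e1, if_neg (fun hcon => hday hcon.2),
            if_pos ⟨⟨b, List.mem_cons_self, hcov⟩, hv⟩]
      · have e1 : (if b.start ≤ (k : Int) ∧ (k : Int) ≤ b.stop ∧ res[k]? = some (-1)
            then some day else res[k]?) = res[k]? := if_neg (fun hcon => hcov ⟨hcon.1, hcon.2.1⟩)
        rw [e1]
        by_cases hex : ∃ x ∈ t, x.start ≤ (k : Int) ∧ (k : Int) ≤ x.stop
        · rw [if_pos ⟨hex, hv⟩,
              if_pos ⟨⟨hex.choose, List.mem_cons_of_mem b hex.choose_spec.1,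
                hex.choose_spec.2⟩, hv⟩]
        · rw [if_neg (fun hcon => hex hcon.1)]
          rw [if_neg ?hno]
          case hno =>
            rintro ⟨⟨x, hx, hc⟩, -⟩
            rcases List.mem_cons.mp hx with h | h
            · exact hcov (h ▸ hc)
            · exact hex ⟨x, h, hc⟩
    · have e1 : (if b.start ≤ (k : Int) ∧ (k : Int) ≤ b.stop ∧ res[k]? = some (-1)
          then some day else res[k]?) = res[k]? := if_neg (fun hcon => hv hcon.2.2)
      rw [e1, if_neg (fun hcon => hv hcon.2), if_neg (fun hcon => hv hcon.2)]

theorem markG_length (day : Int) (r g : List Int) : (markG day r g).length = r.length :=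
  foldl_len _ (fun r x => PySem.List.length_pySetD r x _) _ _

theorem dayRes_length (day : Int) (res : List Int) (L : List (List Int)) :
    (dayRes day res L).length = res.length := by
  unfold dayRes
  refine foldl_len _ (fun r g => ?_) L res
  split
  · exact markG_length day r g
  · rfl

theorem markG_get (day : Int) :
    ∀ (g r : List Int) (k : Nat), (∀ q ∈ g, 0 ≤ q) →
    (markG day r g)[k]?
      = if (k : Int) ∈ g then (if k < r.length then some day else none) else r[k]? := by
  intro g
  induction g with
  | nil => intro r k _; simp [markG]
  | cons q g ih =>
    intro r k hq
    have hq0 : 0 ≤ q := hq q List.mem_cons_self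
    have hstep : markG day r (q :: g) = markG day (r.set q.toNat day) g := by
      unfold markG
      rw [List.foldl_cons, PySem.List.pySetD_of_nonneg r day hq0]
    rw [hstep, ih (r.set q.toNat day) k (fun x hx => hq x (List.mem_cons_of_mem q hx))]
    rw [List.length_set]
    by_cases hm : (k : Int) ∈ g
    · rw [if_pos hm, if_pos (List.mem_cons_of_mem q hm)]
    · rw [if_neg hm, List.getElem?_set]
      by_cases hk : q.toNat = k
      · subst hk
        have hmem : ((q.toNat : Nat) : Int) ∈ q :: g := by
          have hqk : ((q.toNat : Nat) : Int) = q := by omega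
          rw [hqk]
          exact List.mem_cons_self
        rw [if_pos rfl, if_pos hmem]
      · have hnmem : ¬ ((k : Int) ∈ q :: g) := by
          intro hcon
          rcases List.mem_cons.mp hcon with h | h
          · omega
          · exact hm h
        rw [if_neg hk, if_neg hnmem]

theorem dayRes_get (day : Int) :
    ∀ (L : List (List Int)) (res : List Int) (k : Nat),
    (∀ g ∈ L, ∀ q ∈ g, 0 ≤ q) →
    (dayRes day res L)[k]?
      = if ∃ g ∈ L, 3 ≤ g.length ∧ (k : Int) ∈ g then
          (if k < res.length then some day else none)
        else res[k]? := by
  intro L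
  induction L with
  | nil => intro res k _; simp [dayRes]
  | cons g L ih =>
    intro res k hq
    have hstep : dayRes day res (g :: L)
        = dayRes day (if 3 ≤ g.length then markG day res g else res) L := by
      unfold dayRes
      rw [List.foldl_cons]
    rw [hstep, ih _ k (fun x hx => hq x (List.mem_cons_of_mem g hx))]
    have hlen : (if 3 ≤ g.length then markG day res g else res).length = res.length := by
      split
      · exact markG_length day res g
      · rfl
    rw [hlen]
    by_cases hex : ∃ g' ∈ L, 3 ≤ g'.length ∧ (k : Int) ∈ g'
    · have hex' : ∃ g' ∈ g :: L, 3 ≤ g'.length ∧ (k : Int) ∈ g' := by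
        rcases hex with ⟨g', hg', h3, hk⟩
        exact ⟨g', List.mem_cons_of_mem g hg', h3, hk⟩
      rw [if_pos hex, if_pos hex']
    · rw [if_neg hex]
      by_cases hg3 : 3 ≤ g.length
      · rw [if_pos hg3, markG_get day g res k (hq g List.mem_cons_self)]
        by_cases hk : (k : Int) ∈ g
        · have hex' : ∃ g' ∈ g :: L, 3 ≤ g'.length ∧ (k : Int) ∈ g' :=
            ⟨g, List.mem_cons_self, hg3, hk⟩
          rw [if_pos hk, if_pos hex']
        · have hex' : ¬ ∃ g' ∈ g :: L, 3 ≤ g'.length ∧ (k : Int) ∈ g' := by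
            rintro ⟨g', hg', h3, hkk⟩
            rcases List.mem_cons.mp hg' with h | h
            · exact hk (h ▸ hkk)
            · exact hex ⟨g', h, h3, hkk⟩
          rw [if_neg hk, if_neg hex']
      · have hex' : ¬ ∃ g' ∈ g :: L, 3 ≤ g'.length ∧ (k : Int) ∈ g' := by
          rintro ⟨g', hg', h3, hkk⟩
          rcases List.mem_cons.mp hg' with h | h
          · exact hg3 (h ▸ h3)
          · exact hex ⟨g', h, h3, hkk⟩
        rw [if_neg hg3, if_neg hex']

theorem dayRes_noop (day : Int) (res : List Int) (L : List (List Int))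
    (h : dayChanged L = false) : dayRes day res L = res := by
  unfold dayRes
  apply foldl_fixed
  intro g hg
  have := List.any_eq_false.mp h g hg
  rw [if_neg (by simpa using this)]

-- ---- regroup properties ----

theorem regroup_flatten (bal : List Int) :
    ∀ (M acc : List (List Int)),
    ((M.foldl (mergeG bal) acc).reverse).flatten = acc.reverse.flatten ++ M.flatten := by
  intro M
  induction M with
  | nil => intro acc; simp
  | cons g M ih =>
    intro acc
    rw [List.foldl_cons, ih]
    have hstep : (mergeG bal acc g).reverse.flatten = acc.reverse.flatten ++ g := by
      unfold mergeG
      match acc with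
      | [] => simp
      | h :: t =>
        dsimp only
        split
        · simp
        · simp
    rw [hstep, List.flatten_cons, List.append_assoc]

theorem goodG_append (bal : List Int) (h g : List Int) (hh : GoodG bal h) (hg : GoodG bal g)
    (hc : colorOf bal (h.headD 0) = colorOf bal (g.headD 0)) : GoodG bal (h ++ g) := by
  obtain ⟨hne, hcol⟩ := hh
  obtain ⟨gne, gcol⟩ := hg
  refine ⟨by simp [hne], ?_⟩
  intro p hp
  rw [headD_append _ _ hne]
  rcases List.mem_append.mp hp with h' | h'
  · exact hcol p h'
  · rw [gcol p h', ← hc]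

theorem regroup_good (bal : List Int) :
    ∀ (M acc : List (List Int)), (∀ g ∈ M, GoodG bal g) → (∀ g ∈ acc, GoodG bal g) →
    ∀ g ∈ M.foldl (mergeG bal) acc, GoodG bal g := by
  intro M
  induction M with
  | nil => intro acc _ hacc g hg; exact hacc g hg
  | cons g M ih =>
    intro acc hM hacc x hx
    refine ih (mergeG bal acc g) (fun y hy => hM y (List.mem_cons_of_mem g hy)) ?_ x hx
    intro y hy
    unfold mergeG at hy
    have hgood : GoodG bal g := hM g List.mem_cons_self
    match acc, hy with
    | [], hy =>
      rcases List.mem_singleton.mp hy with rfl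
      exact hgood
    | h :: t, hy =>
      dsimp only at hy
      by_cases hcl : colorOf bal (h.headD 0) = colorOf bal (g.headD 0)
      · rw [if_pos hcl] at hy
        rcases List.mem_cons.mp hy with rfl | h'
        · exact goodG_append bal h g (hacc h List.mem_cons_self) hgood hcl
        · exact hacc y (List.mem_cons_of_mem h h')
      · rw [if_neg hcl] at hy
        rcases List.mem_cons.mp hy with rfl | h'
        · exact hgood
        · exact hacc y h'

theorem regroup_chain (bal : List Int) :
    ∀ (M acc : List (List Int)), (∀ g ∈ M, GoodG bal g) → (∀ g ∈ acc, g ≠ []) →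
    List.IsChain (Differ bal) acc.reverse →
    List.IsChain (Differ bal) ((M.foldl (mergeG bal) acc).reverse) := by
  intro M
  induction M with
  | nil => intro acc _ _ hch; exact hch
  | cons g M ih =>
    intro acc hM hacc hch
    rw [List.foldl_cons]
    refine ih (mergeG bal acc g) (fun y hy => hM y (List.mem_cons_of_mem g hy)) ?_ ?_
    · intro y hy
      unfold mergeG at hy
      have hgne : g ≠ [] := (hM g List.mem_cons_self).1
      match acc, hy with
      | [], hy =>
        rcases List.mem_singleton.mp hy with rfl
        exact hgne
      | h :: t, hy =>
        dsimp only at hy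
        by_cases hcl : colorOf bal (h.headD 0) = colorOf bal (g.headD 0)
        · rw [if_pos hcl] at hy
          rcases List.mem_cons.mp hy with rfl | h'
          · simp [hacc h List.mem_cons_self]
          · exact hacc y (List.mem_cons_of_mem h h')
        · rw [if_neg hcl] at hy
          rcases List.mem_cons.mp hy with rfl | h'
          · exact hgne
          · exact hacc y h'
    · unfold mergeG
      match acc with
      | [] => simp
      | h :: t =>
        dsimp only
        by_cases hcl : colorOf bal (h.headD 0) = colorOf bal (g.headD 0)
        · rw [if_pos hcl]
          simp only [List.reverse_cons] at hch ⊢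
          rw [List.isChain_append] at hch ⊢
          refine ⟨hch.1, List.isChain_singleton _, ?_⟩
          intro x hx y hy
          simp only [List.head?_cons, Option.mem_def, Option.some.injEq] at hy
          subst hy
          have := hch.2.2 x hx h rfl
          unfold Differ at this ⊢
          rw [headD_append _ _ (hacc h List.mem_cons_self)]
          exact this
        · rw [if_neg hcl]
          simp only [List.reverse_cons] at hch ⊢
          rw [List.isChain_append]
          refine ⟨hch, List.isChain_singleton _, ?_⟩
          intro x hx y hy
          simp only [List.head?_cons, Option.mem_def, Option.some.injEq] at hy
          subst hy
          rw [List.getLast?_append_of_ne_nil (l₁ := t.reverse) (by simp)] at hx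
          simp only [List.getLast?_singleton, Option.mem_def, Option.some.injEq] at hx
          subst hx
          exact hcl

theorem regroup_len (bal : List Int) :
    ∀ (M acc : List (List Int)), (M.foldl (mergeG bal) acc).length ≤ acc.length + M.length := by
  intro M
  induction M with
  | nil => intro acc; simp
  | cons g M ih =>
    intro acc
    have h1 := ih (mergeG bal acc g)
    have h2 : (mergeG bal acc g).length ≤ acc.length + 1 := by
      unfold mergeG
      match acc with
      | [] => simp
      | h :: t => dsimp only; split <;> simp
    simp only [List.foldl_cons, List.length_cons]
    omega

theorem mergeAB (bal : List Int) :
    ∀ (M acc : List (List Int)), (∀ g ∈ M, g ≠ []) → (∀ g ∈ acc, g ≠ []) →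
    List.foldl mergeStepA (acc.map (toBlock bal)) (M.map (toBlock bal))
      = (M.foldl (mergeG bal) acc).map (toBlock bal) := by
  intro M
  induction M with
  | nil => intro acc _ _; rfl
  | cons g M ih =>
    intro acc hM hacc
    have hgne : g ≠ [] := hM g List.mem_cons_self
    have hstep : mergeStepA (acc.map (toBlock bal)) (toBlock bal g)
        = (mergeG bal acc g).map (toBlock bal) := by
      unfold mergeStepA mergeG
      match acc with
      | [] => rfl
      | h :: t =>
        have hhne : h ≠ [] := hacc h List.mem_cons_self
        simp only [List.map_cons]
        by_cases hcl : colorOf bal (h.headD 0) = colorOf bal (g.headD 0)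
        · rw [if_pos (by exact hcl), if_pos hcl]
          simp only [List.map_cons, List.cons.injEq, and_true]
          unfold toBlock
          rw [headD_append _ _ hhne, getLastD_append h _ hgne]
          congr 1
          push_cast [List.length_append]
          ring
        · rw [if_neg (by exact hcl), if_neg hcl]
          simp only [List.map_cons]
    rw [List.map_cons, List.foldl_cons, List.foldl_cons, hstep]
    refine ih (mergeG bal acc g) (fun y hy => hM y (List.mem_cons_of_mem g hy)) ?_
    intro y hy
    unfold mergeG at hy
    match acc, hy with
    | [], hy =>
      rcases List.mem_singleton.mp hy with rfl
      exact hgne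
    | h :: t, hy =>
      dsimp only at hy
      by_cases hcl : colorOf bal (h.headD 0) = colorOf bal (g.headD 0)
      · rw [if_pos hcl] at hy
        rcases List.mem_cons.mp hy with rfl | h'
        · simp [hacc h List.mem_cons_self]
        · exact hacc y (List.mem_cons_of_mem h h')
      · rw [if_neg hcl] at hy
        rcases List.mem_cons.mp hy with rfl | h'
        · exact hgne
        · exact hacc y h'

-- ---- sortedness helpers ----

theorem flatten_filter_sublist (q : List Int → Bool) :
    ∀ L : List (List Int), (L.filter q).flatten.Sublist L.flatten := by
  intro L
  induction L with
  | nil => simp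
  | cons g L ih =>
    rw [List.filter_cons]
    by_cases hq : q g
    · rw [if_pos hq, List.flatten_cons, List.flatten_cons]
      exact ih.append_left g
    · rw [if_neg hq, List.flatten_cons]
      exact ih.trans (List.sublist_append_right g L.flatten)

theorem head_le_mem {g : List Int} (hs : List.Pairwise (· < ·) g) :
    ∀ x ∈ g, g.headD 0 ≤ x ∧ x ≤ g.getLastD 0 := by
  induction g with
  | nil => intro x hx; simp at hx
  | cons a l ih =>
    intro x hx
    have hpl : List.Pairwise (· < ·) l := (List.pairwise_cons.mp hs).2
    have hal : ∀ y ∈ l, a < y := (List.pairwise_cons.mp hs).1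
    cases l with
    | nil =>
      rcases List.mem_singleton.mp hx with rfl
      exact ⟨le_refl _, le_refl _⟩
    | cons b m =>
      have hlast : (a :: b :: m).getLastD 0 = (b :: m).getLastD 0 := by
        rw [List.getLastD_cons]
        exact getLastD_irrel a 0 (List.cons_ne_nil b m)
      rw [hlast]
      rcases List.mem_cons.mp hx with rfl | hx'
      · refine ⟨le_refl _, ?_⟩
        have hb := (ih hpl b List.mem_cons_self).2
        have hab := hal b List.mem_cons_self
        omega
      · have hx2 := ih hpl x hx'
        have hax := hal x hx'
        have h1 : (a :: b :: m).headD 0 = a := rfl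
        refine ⟨by omega, hx2.2⟩

theorem mem_of_between (L : List (List Int)) (g : List Int) (k : Int)
    (hp : List.Pairwise (· < ·) L.flatten) (hg : g ∈ L) (hne : g ≠ [])
    (h1 : g.headD 0 ≤ k) (h2 : k ≤ g.getLastD 0) (hmem : k ∈ L.flatten) : k ∈ g := by
  obtain ⟨s, t, rfl⟩ := List.append_of_mem hg
  rw [List.flatten_append, List.flatten_cons] at hp hmem
  have hhead : g.headD 0 ∈ g := headD_mem 0 hne
  have hlast : g.getLastD 0 ∈ g := by
    have : g.getLastD 0 = g.reverse.headD 0 := by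
      rw [List.getLastD_eq_getLast?, ← List.head?_reverse]
      cases hr : g.reverse with
      | nil => exact absurd (by simpa using hr) hne
      | cons a m => rfl
    rw [this, ← List.mem_reverse]
    exact headD_mem 0 (by simp [hne])
  rcases List.mem_append.mp hmem with hs | hgt
  · exfalso
    have := (List.pairwise_append.mp hp).2.2 k hs (g.headD 0) (by
      rw [List.mem_append]; exact Or.inl hhead)
    omega
  · rcases List.mem_append.mp hgt with hk | ht
    · exact hk
    · exfalso
      have hp2 : List.Pairwise (· < ·) (g ++ t.flatten) := (List.pairwise_append.mp hp).2.1
      have := (List.pairwise_append.mp hp2).2.2 (g.getLastD 0) hlast k ht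
      omega

theorem popped_not_kept (L : List (List Int)) (g : List Int) (k : Int)
    (hp : List.Pairwise (· < ·) L.flatten) (hg : g ∈ L) (h3 : 3 ≤ g.length) (hk : k ∈ g) :
    k ∉ dayKeep L := by
  intro hcon
  obtain ⟨s, t, rfl⟩ := List.append_of_mem hg
  rcases List.mem_flatten.mp hcon with ⟨g', hg', hk'⟩
  have hg'L := List.mem_of_mem_filter hg'
  have hkeep : g'.length < 3 := by
    have := List.of_mem_filter hg'
    simpa using this
  rw [List.flatten_append, List.flatten_cons] at hp
  have hnd : (s.flatten ++ (g ++ t.flatten)).Nodup :=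
    (hp.imp (fun h => ne_of_lt h))
  rcases List.mem_append.mp hg'L with hs | hgt
  · have hdisj := List.disjoint_of_nodup_append hnd
    exact hdisj (List.mem_flatten.mpr ⟨g', hs, hk'⟩) (List.mem_append.mpr (Or.inl hk))
  · rcases List.mem_cons.mp hgt with rfl | ht
    · omega
    · have hnd2 : (g ++ t.flatten).Nodup := (List.nodup_append.mp hnd).2.1
      have hdisj := List.disjoint_of_nodup_append hnd2
      exact hdisj hk (List.mem_flatten.mpr ⟨g', ht, hk'⟩)

-- ---- the B-side scan characterisation ----

theorem scan_accum (bal : List Int) (day : Int) :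
    ∀ (tail : List Int) (ch : Bool) (keep g₀ res : List Int),
    g₀ ≠ [] → (∀ p ∈ tail, colorOf bal p = colorOf bal (g₀.headD 0)) →
    List.foldl (stepP bal day) (ch, keep, g₀, res) tail = (ch, keep, g₀ ++ tail, res) := by
  intro tail
  induction tail with
  | nil => intro ch keep g₀ res _ _; simp
  | cons p tl ih =>
    intro ch keep g₀ res hne hcol
    have hcnot : ¬ (g₀ ≠ [] ∧
        PySem.List.pyGetD bal p 0 ≠ PySem.List.pyGetD bal (g₀.headD 0) 0) := by
      intro hcon
      exact hcon.2 (hcol p List.mem_cons_self)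
    have hstep : stepP bal day (ch, keep, g₀, res) p = (ch, keep, g₀ ++ [p], res) := by
      unfold stepP
      rw [if_neg hcnot]
    rw [List.foldl_cons, hstep, ih ch keep (g₀ ++ [p]) res (by simp) ?_]
    · rw [List.append_assoc]
      rfl
    · intro q hq
      rw [headD_append _ _ hne]
      exact hcol q (List.mem_cons_of_mem p hq)

theorem scan_groups (bal : List Int) (day : Int) :
    ∀ (gs : List (List Int)) (ch : Bool) (keep : List Int) (g₀ res : List Int),
    GoodG bal g₀ → (∀ g ∈ gs, GoodG bal g) → List.IsChain (Differ bal) (g₀ :: gs) →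
    List.foldl (stepP bal day) (ch, keep, g₀, res) gs.flatten
      = (ch || dayChanged ((g₀ :: gs).dropLast),
         keep ++ dayKeep ((g₀ :: gs).dropLast),
         (g₀ :: gs).getLastD [],
         dayRes day res ((g₀ :: gs).dropLast)) := by
  intro gs
  induction gs with
  | nil =>
    intro ch keep g₀ res _ _ _
    simp [dayChanged, dayKeep, dayRes]
  | cons g₁ gs ih =>
    intro ch keep g₀ res h0 hgs hch
    have hg1 : GoodG bal g₁ := hgs g₁ List.mem_cons_self
    obtain ⟨p, tl, rfl⟩ := List.exists_cons_of_ne_nil hg1.1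
    rw [List.flatten_cons, List.foldl_append]
    have hdiff : Differ bal g₀ (p :: tl) := hch.rel_head
    have hcond : g₀ ≠ [] ∧
        PySem.List.pyGetD bal p 0 ≠ PySem.List.pyGetD bal (g₀.headD 0) 0 := by
      refine ⟨h0.1, ?_⟩
      exact fun hcon => hdiff hcon.symm
    have hstep : stepP bal day (ch, keep, g₀, res) p
        = (ch || (flushB g₀ res keep day).2.2, (flushB g₀ res keep day).2.1, [p],
           (flushB g₀ res keep day).1) := by
      unfold stepP
      rw [if_pos hcond]
    have haccum := scan_accum bal day tl (ch || (flushB g₀ res keep day).2.2)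
      (flushB g₀ res keep day).2.1 [p] (flushB g₀ res keep day).1
      (by simp) (fun q hq => by
        have h1 := hg1.2 q (List.mem_cons_of_mem p hq)
        have h2 : ((p :: tl).headD 0) = ([p].headD 0 : Int) := rfl
        rw [h1, h2])
    rw [List.foldl_cons, hstep, haccum]
    have hih := ih (ch || (flushB g₀ res keep day).2.2)
      (flushB g₀ res keep day).2.1 ([p] ++ tl) (flushB g₀ res keep day).1
      (by simpa using hg1) (fun g hg => hgs g (List.mem_cons_of_mem _ hg))
      (by simpa using hch.tail)
    rw [List.singleton_append] at hih ⊢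
    rw [hih]
    have hdrop : (g₀ :: (p :: tl) :: gs).dropLast = g₀ :: ((p :: tl) :: gs).dropLast := rfl
    have hlast : (g₀ :: (p :: tl) :: gs).getLastD [] = ((p :: tl) :: gs).getLastD [] := by
      rw [List.getLastD_cons]
      exact getLastD_irrel g₀ [] (List.cons_ne_nil _ _)
    rw [hdrop, hlast]
    have hchg : dayChanged (g₀ :: ((p :: tl) :: gs).dropLast)
        = (decide (3 ≤ g₀.length) || dayChanged (((p :: tl) :: gs).dropLast)) := by
      unfold dayChanged
      rw [List.any_cons]
    have hkeepc : dayKeep (g₀ :: ((p :: tl) :: gs).dropLast)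
        = (if g₀.length < 3 then g₀ else []) ++ dayKeep (((p :: tl) :: gs).dropLast) := by
      unfold dayKeep
      rw [List.filter_cons]
      by_cases h3 : g₀.length < 3
      · rw [if_pos (by simpa using h3), if_pos h3, List.flatten_cons]
      · rw [if_neg (by simpa using h3), if_neg h3, List.nil_append]
    have hresc : dayRes day res (g₀ :: ((p :: tl) :: gs).dropLast)
        = dayRes day (if 3 ≤ g₀.length then markG day res g₀ else res)
            (((p :: tl) :: gs).dropLast) := by
      unfold dayRes
      rw [List.foldl_cons]
    rw [hchg, hkeepc, hresc]
    by_cases hg3 : 3 ≤ g₀.length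
    · have hfl : flushB g₀ res keep day = (markG day res g₀, keep, true) := by
        unfold flushB markG
        rw [if_pos hg3]
      rw [hfl]
      dsimp only
      rw [if_pos hg3, if_neg (by omega : ¬ g₀.length < 3), List.nil_append]
      have hb : (decide (3 ≤ g₀.length) : Bool) = true := by simpa using hg3
      rw [hb]
      simp
    · have hfl : flushB g₀ res keep day = (res, keep ++ g₀, false) := by
        unfold flushB
        rw [if_neg hg3]
      rw [hfl]
      dsimp only
      rw [if_neg hg3, if_pos (by omega : g₀.length < 3)]
      have hb : (decide (3 ≤ g₀.length) : Bool) = false := by simpa using hg3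
      rw [hb]
      simp [List.append_assoc]

theorem loopB_day (bal : List Int) (day : Int) (res : List Int) (g₀ : List Int)
    (gs : List (List Int)) (h0 : GoodG bal g₀) (hgs : ∀ g ∈ gs, GoodG bal g)
    (hch : List.IsChain (Differ bal) (g₀ :: gs)) :
    loopB res (g₀ :: gs).flatten bal day
      = if dayChanged (g₀ :: gs) then
          loopB (dayRes day res (g₀ :: gs)) (dayKeep (g₀ :: gs)) bal (day + 1)
        else dayRes day res (g₀ :: gs) := by
  have hscan : (g₀ :: gs).flatten.foldl (stepP bal day) (false, [], [], res)
      = (dayChanged ((g₀ :: gs).dropLast), dayKeep ((g₀ :: gs).dropLast),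
         (g₀ :: gs).getLastD [], dayRes day res ((g₀ :: gs).dropLast)) := by
    obtain ⟨p, tl, hpg⟩ := List.exists_cons_of_ne_nil h0.1
    rw [List.flatten_cons, List.foldl_append]
    have h1 : g₀.foldl (stepP bal day) (false, [], [], res) = (false, [], g₀, res) := by
      rw [hpg, List.foldl_cons]
      have hstep : stepP bal day (false, ([] : List Int), ([] : List Int), res) p
          = (false, [], [p], res) := by
        unfold stepP
        rw [if_neg (by intro hcon; exact hcon.1 rfl)]
        rfl
      rw [hstep]
      exact scan_accum bal day tl false [] [p] res (by simp) (fun q hq => by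
        have := h0.2 q (by rw [hpg]; exact List.mem_cons_of_mem p hq)
        rw [hpg] at this
        exact this)
    rw [h1, scan_groups bal day gs false [] g₀ res h0 hgs hch]
    simp
  rw [loopB.eq_def]
  dsimp only
  rw [hscan]
  dsimp only
  set M := (g₀ :: gs).dropLast with hM
  set lg := (g₀ :: gs).getLastD [] with hlg
  have hLsplit : M ++ [lg] = g₀ :: gs := dropLast_getLastD _ _ (List.cons_ne_nil _ _)
  by_cases hg3 : 3 ≤ lg.length
  · have hfl : flushB lg (dayRes day res M) (dayKeep M) day
        = (markG day (dayRes day res M) lg, dayKeep M, true) := by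
      unfold flushB markG
      rw [if_pos hg3]
    rw [hfl]
    have hcL : dayChanged (g₀ :: gs) = true := by
      rw [← hLsplit]
      unfold dayChanged
      rw [List.any_append]
      simp [hg3]
    have hrL : dayRes day res (g₀ :: gs) = markG day (dayRes day res M) lg := by
      rw [← hLsplit]
      unfold dayRes
      rw [List.foldl_append, List.foldl_cons, if_pos hg3, List.foldl_nil]
    have hkL : dayKeep (g₀ :: gs) = dayKeep M := by
      rw [← hLsplit]
      unfold dayKeep
      rw [List.filter_append, List.filter_cons, if_neg (by simp; omega), List.filter_nil,
        List.flatten_append, List.flatten_nil, List.append_nil]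
    rw [hcL, hrL, hkL]
    simp
  · have hfl : flushB lg (dayRes day res M) (dayKeep M) day
        = (dayRes day res M, dayKeep M ++ lg, false) := by
      unfold flushB
      rw [if_neg hg3]
    rw [hfl]
    have hcL : dayChanged (g₀ :: gs) = dayChanged M := by
      rw [← hLsplit]
      unfold dayChanged
      rw [List.any_append]
      simp [hg3]
    have hrL : dayRes day res (g₀ :: gs) = dayRes day res M := by
      rw [← hLsplit]
      unfold dayRes
      rw [List.foldl_append, List.foldl_cons, if_neg hg3, List.foldl_nil]
    have hkL : dayKeep (g₀ :: gs) = dayKeep M ++ lg := by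
      rw [← hLsplit]
      unfold dayKeep
      rw [List.filter_append, List.filter_cons, if_pos (by simp; omega), List.filter_nil,
        List.flatten_append]
      simp
    rw [hcL, hrL, hkL]
    simp

theorem loopB_nil (res bal : List Int) (day : Int) : loopB res [] bal day = res := by
  rw [loopB.eq_def]
  simp [flushB]

-- ---- the main correspondence ----

theorem sublist_flatten_of_mem {g : List Int} {L : List (List Int)} (h : g ∈ L) :
    g.Sublist L.flatten := by
  obtain ⟨s, t, rfl⟩ := List.append_of_mem h
  rw [List.flatten_append, List.flatten_cons]
  exact ((List.sublist_append_left g t.flatten).trans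
    (List.sublist_append_right s.flatten _))

theorem popfill_eq (bal : List Int) (day : Int) (hday : 1 ≤ day)
    (L : List (List Int)) (res : List Int)
    (hgood : ∀ g ∈ L, GoodG bal g)
    (hpw : List.Pairwise (· < ·) L.flatten)
    (hbnd : ∀ p ∈ L.flatten, 0 ≤ p ∧ p < (res.length : Int))
    (h6 : ∀ k : Nat, res[k]? = some (-1) ↔ (k : Int) ∈ L.flatten) :
    (PySem.List.sorted ((L.filter (fun g => decide (3 ≤ g.length))).map (toBlock bal))
        (fun b => b.start) true).foldl (gfill day) res
      = dayRes day res L := by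
  apply List.ext_getElem?_iff.mpr
  intro k
  rw [gfill_fold_get day (by omega) _ res k (by
    intro b hb
    rw [PySem.List.mem_sorted] at hb
    rcases List.mem_map.mp hb with ⟨g, hgf, rfl⟩
    have hgL := List.mem_of_mem_filter hgf
    have hgne := (hgood g hgL).1
    exact (hbnd _ (List.mem_flatten.mpr ⟨g, hgL, headD_mem 0 hgne⟩)).1)]
  rw [dayRes_get day L res k (fun g hg q hq =>
    (hbnd q (List.mem_flatten.mpr ⟨g, hg, hq⟩)).1)]
  by_cases hex : ∃ g ∈ L, 3 ≤ g.length ∧ (k : Int) ∈ g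
  · rcases hex with ⟨g, hgL, h3, hkin⟩
    have hkfl : (k : Int) ∈ L.flatten := List.mem_flatten.mpr ⟨g, hgL, hkin⟩
    have hres : res[k]? = some (-1) := (h6 k).mpr hkfl
    have hklen : k < res.length := (List.getElem?_eq_some_iff.mp hres).choose
    have hg_sorted : List.Pairwise (· < ·) g := hpw.sublist (sublist_flatten_of_mem hgL)
    have hcov := head_le_mem hg_sorted _ hkin
    have hb : toBlock bal g ∈ PySem.List.sorted
        ((L.filter (fun g => decide (3 ≤ g.length))).map (toBlock bal))
        (fun b => b.start) true := by
      rw [PySem.List.mem_sorted]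
      exact List.mem_map.mpr ⟨g, List.mem_filter.mpr ⟨hgL, by simpa using h3⟩, rfl⟩
    have hc1 : ∃ g' ∈ L, 3 ≤ g'.length ∧ (k : Int) ∈ g' := ⟨g, hgL, h3, hkin⟩
    rw [if_pos ⟨⟨toBlock bal g, hb, hcov.1, hcov.2⟩, hres⟩, if_pos hc1, if_pos hklen]
  · rw [if_neg hex]
    rw [if_neg ?hno]
    case hno =>
      rintro ⟨⟨b, hb, hc1, hc2⟩, hres⟩
      rw [PySem.List.mem_sorted] at hb
      rcases List.mem_map.mp hb with ⟨g, hgf, rfl⟩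
      have hgL := List.mem_of_mem_filter hgf
      have h3 : 3 ≤ g.length := by
        have := List.of_mem_filter hgf
        simpa using this
      have hkfl : (k : Int) ∈ L.flatten := (h6 k).mp hres
      have hkin : (k : Int) ∈ g :=
        mem_of_between L g _ hpw hgL (hgood g hgL).1 hc1 hc2 hkfl
      exact hex ⟨g, hgL, h3, hkin⟩

theorem h6_next (bal : List Int) (day : Int) (hday : 1 ≤ day)
    (L : List (List Int)) (res : List Int)
    (hpw : List.Pairwise (· < ·) L.flatten)
    (hbnd : ∀ p ∈ L.flatten, 0 ≤ p ∧ p < (res.length : Int))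
    (h6 : ∀ k : Nat, res[k]? = some (-1) ↔ (k : Int) ∈ L.flatten) :
    ∀ k : Nat, (dayRes day res L)[k]? = some (-1) ↔ (k : Int) ∈ dayKeep L := by
  intro k
  rw [dayRes_get day L res k (fun g hg q hq =>
    (hbnd q (List.mem_flatten.mpr ⟨g, hg, hq⟩)).1)]
  by_cases hex : ∃ g ∈ L, 3 ≤ g.length ∧ (k : Int) ∈ g
  · rw [if_pos hex]
    rcases hex with ⟨g, hgL, h3, hkin⟩
    constructor
    · intro hcon
      by_cases hkl : k < res.length
      · rw [if_pos hkl] at hcon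
        have : day = -1 := by simpa using hcon
        omega
      · rw [if_neg hkl] at hcon
        exact absurd hcon (by simp)
    · intro hkk
      exact (popped_not_kept L g _ hpw hgL h3 hkin hkk).elim
  · rw [if_neg hex, h6 k]
    constructor
    · intro hkfl
      rcases List.mem_flatten.mp hkfl with ⟨g, hgL, hkin⟩
      have h3 : g.length < 3 := by
        by_contra hcon
        exact hex ⟨g, hgL, by omega, hkin⟩
      exact List.mem_flatten.mpr
        ⟨g, List.mem_filter.mpr ⟨hgL, by simpa using h3⟩, hkin⟩
    · intro hkk
      rcases List.mem_flatten.mp hkk with ⟨g, hgf, hkin⟩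
      exact List.mem_flatten.mpr ⟨g, List.mem_of_mem_filter hgf, hkin⟩

theorem day_eq (bal : List Int) (L : List (List Int)) :
    ∀ (res : List Int) (day : Int),
    1 ≤ day →
    (∀ g ∈ L, GoodG bal g) →
    List.IsChain (Differ bal) L →
    List.Pairwise (· < ·) L.flatten →
    (∀ p ∈ L.flatten, 0 ≤ p ∧ p < (res.length : Int)) →
    (∀ k : Nat, res[k]? = some (-1) ↔ (k : Int) ∈ L.flatten) →
    loopA res (L.map (toBlock bal)) day = loopB res L.flatten bal day := by
  intro res day hday hgood hch hpw hbnd h6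
  match hL : L with
  | [] =>
    rw [loopA.eq_def, List.flatten_nil, loopB_nil]
    simp
  | g₀ :: gs =>
    rw [loopB_day bal day res g₀ gs (hgood g₀ List.mem_cons_self)
      (fun g hg => hgood g (List.mem_cons_of_mem g₀ hg)) hch]
    rw [loopA.eq_def]
    have hfilter_ge : (List.map (toBlock bal) (g₀ :: gs)).filter (fun b => decide (3 ≤ b.size))
        = ((g₀ :: gs).filter (fun g => decide (3 ≤ g.length))).map (toBlock bal) := by
      rw [List.filter_map]
      congr 1
      apply List.filter_congr
      intro g _
      show decide (3 ≤ ((g.length : Nat) : Int)) = decide (3 ≤ g.length)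
      rw [decide_eq_decide]
      omega
    have hfilter_lt : (List.map (toBlock bal) (g₀ :: gs)).filter (fun b => decide (b.size < 3))
        = ((g₀ :: gs).filter (fun g => decide (g.length < 3))).map (toBlock bal) := by
      rw [List.filter_map]
      congr 1
      apply List.filter_congr
      intro g _
      show decide (((g.length : Nat) : Int) < 3) = decide (g.length < 3)
      rw [decide_eq_decide]
      omega
    by_cases hchg : dayChanged (g₀ :: gs) = true
    · rcases List.any_eq_true.mp hchg with ⟨gp, hgp, hgp3⟩
      have hgp3' : 3 ≤ gp.length := by simpa using hgp3
      have hne : (List.map (toBlock bal) (g₀ :: gs)).filter (fun b => decide (3 ≤ b.size)) ≠ [] := by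
        rw [hfilter_ge]
        simp only [ne_eq, List.map_eq_nil_iff, List.filter_eq_nil_iff]
        intro hcon
        exact hcon gp hgp (by simpa using hgp3')
      rw [if_neg hne, if_pos hchg]
      dsimp only
      rw [hfilter_ge, hfilter_lt]
      rw [popfill_eq bal day hday (g₀ :: gs) res hgood hpw hbnd h6]
      set Lk := (g₀ :: gs).filter (fun g => decide (g.length < 3)) with hLk
      have hLkgood : ∀ g ∈ Lk, GoodG bal g := fun g hg => hgood g (List.mem_of_mem_filter hg)
      have hLkne : ∀ g ∈ Lk, g ≠ [] := fun g hg => (hLkgood g hg).1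
      have hmerged : (((Lk.map (toBlock bal)).foldl mergeStepA []).reverse)
          = (regroup bal Lk).map (toBlock bal) := by
        have hm := mergeAB bal Lk [] hLkne (by simp)
        rw [show (([] : List (List Int)).map (toBlock bal)) = [] from rfl] at hm
        rw [hm, ← List.map_reverse]
        rfl
      rw [hmerged]
      have hflat' : (regroup bal Lk).flatten = dayKeep (g₀ :: gs) := by
        unfold regroup
        rw [regroup_flatten bal Lk []]
        unfold dayKeep
        rw [hLk]
        rfl
      have hsub : (dayKeep (g₀ :: gs)).Sublist (g₀ :: gs).flatten := by
        unfold dayKeep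
        exact flatten_filter_sublist _ _
      have hrec := day_eq bal (regroup bal Lk) (dayRes day res (g₀ :: gs)) (day + 1)
        (by omega)
        (fun g hg => regroup_good bal Lk [] hLkgood (by simp) g (List.mem_reverse.mp hg))
        (regroup_chain bal Lk [] hLkgood (by simp) (by simp))
        (by rw [hflat']; exact hpw.sublist hsub)
        (by
          rw [hflat', dayRes_length]
          intro p hp
          exact hbnd p (hsub.mem hp))
        (by
          rw [hflat']
          exact h6_next bal day hday (g₀ :: gs) res hpw hbnd h6)
      rw [hrec, hflat']
    · have hchf : dayChanged (g₀ :: gs) = false := by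
        rw [← Bool.not_eq_true]
        exact hchg
      have hany : (g₀ :: gs).any (fun g => decide (3 ≤ g.length)) = false := hchf
      have hfe : (g₀ :: gs).filter (fun g => decide (3 ≤ g.length)) = [] := by
        rw [List.filter_eq_nil_iff]
        exact List.any_eq_false.mp hany
      have hpose : (List.map (toBlock bal) (g₀ :: gs)).filter (fun b => decide (3 ≤ b.size)) = [] := by
        rw [hfilter_ge, hfe]
        rfl
      rw [if_pos hpose, if_neg hchg]
      rw [dayRes_noop day res (g₀ :: gs) hchf]
termination_by L.length
decreasing_by
  have h1 : ((g₀ :: gs).filter (fun g => decide (g.length < 3))).length < (g₀ :: gs).length := by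
    refine List.length_filter_lt_length_iff_exists.mpr ?_
    exact ⟨gp, hgp, by simp; omega⟩
  have h2 := regroup_len bal ((g₀ :: gs).filter (fun g => decide (g.length < 3))) []
  unfold regroup
  rw [List.length_reverse]
  simp only [List.length_nil, Nat.zero_add] at h2
  simp only [hLk] at *
  omega

-- ===== VERDICT (by name: the statement is the Claim_ definition above) =====
theorem solve_balloons_spec : Claim_equal_solve_balloons := by
  intro n balloons hdom hpre
  unfold Spec_solve_balloons
  by_cases hn : n ≤ 0
  · have hA : solve_balloons n balloons = [] := by
      unfold solve_balloons
      rw [PySem.List.pyRange_one_eq_nil (by omega)]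
      dsimp only [List.foldl_nil]
      rw [loopA.eq_def]
      simp [Int.toNat_of_nonpos hn]
      intro h3
      exact absurd h3 (by omega)
    have hB : solve_balloons_alt n balloons = [] := by
      unfold solve_balloons_alt
      rw [PySem.List.pyRange_one_eq_nil (by omega), loopB_nil,
        Int.toNat_of_nonpos hn, List.replicate_zero]
    rw [hA, hB]
  · have hn' : (0 : Int) < n := by omega
    have hbuild := build_eq n balloons 0 [] le_rfl hn'
    have hA : solve_balloons n balloons
        = loopA (List.replicate n.toNat (-1)) ((grpRuns n balloons 0).map (toBlock balloons)) 1 := by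
      show loopA (List.replicate n.toNat (-1))
          (finishBuild n ((PySem.List.pyRange (0 + 1) n 1).foldl (buildStepA balloons)
            (0, PySem.List.pyGetD balloons 0 0, ([] : List Block)))) 1 = _
      rw [hbuild, List.nil_append]
    have hB : solve_balloons_alt n balloons
        = loopB (List.replicate n.toNat (-1)) ((grpRuns n balloons 0).flatten) balloons 1 := by
      unfold solve_balloons_alt
      rw [grp_flatten n balloons 0 le_rfl]
    rw [hA, hB]
    refine day_eq balloons (grpRuns n balloons 0) (List.replicate n.toNat (-1)) 1 le_rfl
      (grp_good n balloons 0 le_rfl)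
      (grp_chain n balloons 0 le_rfl)
      ?_ ?_ ?_
    · rw [grp_flatten n balloons 0 le_rfl]
      exact PySem.List.pairwise_lt_pyRange_one ..
    · rw [grp_flatten n balloons 0 le_rfl]
      intro p hp
      rcases PySem.List.mem_pyRange_one.mp hp with ⟨h1, h2⟩
      rw [List.length_replicate]
      constructor
      · exact h1
      · omega
    · rw [grp_flatten n balloons 0 le_rfl]
      intro k
      rw [List.getElem?_replicate, PySem.List.mem_pyRange_one]
      by_cases hk : k < n.toNat
      · rw [if_pos hk]
        constructor
        · intro _
          omega
        · intro _
          rfl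
      · rw [if_neg hk]
        constructor
        · intro hcon
          exact absurd hcon (by simp)
        · intro hcon
          exfalso
          omega
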